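-- pv_equiv track=rewrite | github.com/xin2233/crypto | py/sm2_genkey.py | pri_key_convert
-- ===== SOURCE A (Python) =====
-- def pri_key_convert(str):
--     line = '    0x' + str[-8:] + ','
--     for i in range(1, len(str) // 8):
--         j = i * 8
--         if i % 4 == 0:
--             temp = '\n    0x' + str[-8 - j: - j] + ','
--         else:
--             temp = '0x' + str[-8 - j: - j] + ','
--         line = line + temp
--     return line
-- ===== SOURCE B (Python) =====
-- def pri_key_convert(str):
--     n = len(str)
--     chunks = [str[-8:]] + [str[-8 - 8 * i: -8 * i] for i in range(1, n // 8)]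
--     rows = []
--     while chunks:
--         rows.append(chunks[:4])
--         chunks = chunks[4:]
--     return '\n'.join('    ' + ''.join('0x' + c + ',' for c in row) for row in rows)
-- ===== Notes on version B (the rewrite author's own statement) =====
-- stated objective: alternative
-- what changed: B builds the list of 8-hex-digit chunks once, groups it into explicit rows of four, renders each row independently and joins the rows with newlines, instead of A's flat accumulator loop that decides row breaks with an i % 4 test on every iteration.
import Mathlib
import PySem

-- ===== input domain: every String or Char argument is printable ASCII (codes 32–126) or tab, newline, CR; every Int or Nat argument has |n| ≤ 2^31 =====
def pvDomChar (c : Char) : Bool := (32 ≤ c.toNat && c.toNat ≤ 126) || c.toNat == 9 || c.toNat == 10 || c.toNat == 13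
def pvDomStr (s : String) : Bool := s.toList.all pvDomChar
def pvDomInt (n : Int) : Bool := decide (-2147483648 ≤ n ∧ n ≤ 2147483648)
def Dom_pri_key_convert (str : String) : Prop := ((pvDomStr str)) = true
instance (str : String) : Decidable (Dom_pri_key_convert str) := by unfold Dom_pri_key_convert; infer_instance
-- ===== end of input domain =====

-- B groups the chunks into explicit rows of four rendered independently, instead of A's flat
-- index loop with an i % 4 test; same output (objective: alternative decomposition, no speed claim).

-- ===== PORT A =====
def pri_key_convert (str : String) : String :=
  let line := "    0x" ++ PySem.Str.slice str (some (-8)) none ++ ","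
  (PySem.List.pyRange 1 (PySem.Int.floordiv (PySem.Str.len str) 8) 1).foldl
    (fun line i =>
      let j := i * 8
      let temp :=
        if PySem.Int.mod i 4 == 0 then
          "\n    0x" ++ PySem.Str.slice str (some (-8 - j)) (some (-j)) ++ ","
        else
          "0x" ++ PySem.Str.slice str (some (-8 - j)) (some (-j)) ++ ","
      line ++ temp) line

-- ===== PORT B =====
-- the while loop of Source B: rows.append(chunks[:4]); chunks = chunks[4:]
def pvRows : List String → List (List String)
  | [] => []
  | c :: rest => (c :: rest).take 4 :: pvRows ((c :: rest).drop 4)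
  termination_by cs => cs.length
  decreasing_by simp

def pri_key_convert_alt (str : String) : String :=
  let n := PySem.Str.len str
  let chunks := [PySem.Str.slice str (some (-8)) none] ++
    (PySem.List.pyRange 1 (PySem.Int.floordiv n 8) 1).map
      (fun i => PySem.Str.slice str (some (-8 - 8 * i)) (some (-8 * i)))
  let rows := pvRows chunks
  PySem.Str.join "\n" (rows.map (fun row =>
    "    " ++ PySem.Str.join "" (row.map (fun c => "0x" ++ c ++ ","))))

-- ===== PRECONDITION & SPEC =====
def Spec_pri_key_convert (str : String) (out : String) : Prop := out = pri_key_convert_alt str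
instance (str : String) (out : String) : Decidable (Spec_pri_key_convert str out) := by unfold Spec_pri_key_convert; infer_instance

-- ===== CLAIM (what is proved, stated in full; the proofs are below) =====
def Claim_equal_pri_key_convert : Prop := ∀ (str : String), Dom_pri_key_convert str → Spec_pri_key_convert str (pri_key_convert str)

-- ===== LEMMAS AND PROOFS =====

-- character-level rendering of one row / of the whole chunk list (proof-side mirror of B)
def pvRowL (row : List String) : List Char :=
  "    ".toList ++ PySem.Chars.join [] (row.map (fun c => "0x".toList ++ c.toList ++ [',']))

def pvRenderL (cs : List String) : List Char :=
  PySem.Chars.join ['\n'] ((pvRows cs).map pvRowL)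

theorem pvJoin_nil_flatten (L : List (List Char)) : PySem.Chars.join [] L = L.flatten := by
  induction L with
  | nil => simp [PySem.Chars.join, List.intercalate]
  | cons a t ih =>
      cases t with
      | nil => simp [PySem.Chars.join_singleton]
      | cons b t' =>
          rw [PySem.Chars.join_cons_cons]
          simp only [List.flatten_cons]
          rw [← List.flatten_cons]
          rw [ih]
          simp

theorem pvRowL_snoc (row : List String) (c : String) :
    pvRowL (row ++ [c]) = pvRowL row ++ ("0x".toList ++ c.toList ++ [',']) := by
  simp [pvRowL, pvJoin_nil_flatten]

theorem pvRows_ne_nil (cs : List String) (h : cs ≠ []) : pvRows cs ≠ [] := by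
  cases cs with
  | nil => exact absurd rfl h
  | cons a t => simp [pvRows]

theorem pvJoin_newline_cons (a : List Char) (L : List (List Char)) (h : L ≠ []) :
    PySem.Chars.join ['\n'] (a :: L) = a ++ ['\n'] ++ PySem.Chars.join ['\n'] L := by
  cases L with
  | nil => exact absurd rfl h
  | cons b t => rw [PySem.Chars.join_cons_cons]

theorem pvLit2 : "\n    0x".toList = ['\n'] ++ "    ".toList ++ "0x".toList := by decide

theorem pvLit1 : "    0x".toList = "    ".toList ++ "0x".toList := by decide

theorem pvComma : ",".toList = [','] := by decide

theorem pvNewlineL : "\n".toList = ['\n'] := by decide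

theorem pvRenderL_snoc (c : String) : ∀ (cs : List String), cs ≠ [] →
    pvRenderL (cs ++ [c]) = pvRenderL cs ++
      (if cs.length % 4 = 0 then "\n    0x".toList ++ c.toList ++ [',']
       else "0x".toList ++ c.toList ++ [',']) := by
  intro cs
  induction cs using pvRows.induct with
  | case1 => intro h; exact absurd rfl h
  | case2 c0 rest ih =>
      intro _
      rcases Nat.lt_trichotomy rest.length 3 with hlt | heq | hgt
      · -- whole thing still one row
        have ht : (rest ++ [c]).take 3 = rest ++ [c] :=
          List.take_of_length_le (by simp; omega)
        have hd : (rest ++ [c]).drop 3 = [] :=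
          List.drop_eq_nil_of_le (by simp; omega)
        have htr : rest.take 3 = rest := List.take_of_length_le (by omega)
        have hdr : rest.drop 3 = [] := List.drop_eq_nil_of_le (by omega)
        have hm : (c0 :: rest).length % 4 ≠ 0 := by simp; omega
        simp only [pvRenderL, List.cons_append, pvRows, List.take_succ_cons,
          List.drop_succ_cons, ht, hd, htr, hdr]
        simp only [List.map, PySem.Chars.join_singleton]
        rw [show c0 :: (rest ++ [c]) = (c0 :: rest) ++ [c] from rfl, pvRowL_snoc]
        simp
        omega
      · -- exactly filled the row: new row starts
        have ht : (rest ++ [c]).take 3 = rest := by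
          rw [← heq]; simp
        have hd : (rest ++ [c]).drop 3 = [c] := by
          rw [← heq]; simp
        have htr : rest.take 3 = rest := List.take_of_length_le (by omega)
        have hdr : rest.drop 3 = [] := List.drop_eq_nil_of_le (by omega)
        have hm : (c0 :: rest).length % 4 = 0 := by simp [heq]
        simp only [pvRenderL, List.cons_append, pvRows, List.take_succ_cons,
          List.drop_succ_cons, ht, hd, htr, hdr]
        simp only [pvRows, List.take_nil, List.drop_nil, List.map,
          PySem.Chars.join_singleton, PySem.Chars.join_cons_cons]
        simp [pvRowL, pvLit2, PySem.Chars.join_singleton]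
        omega
      · -- row full, recurse on the rest
        have ht : (rest ++ [c]).take 3 = rest.take 3 :=
          List.take_append_of_le_length (by omega)
        have hd : (rest ++ [c]).drop 3 = rest.drop 3 ++ [c] :=
          List.drop_append_of_le_length (by omega)
        have hne : rest.drop 3 ≠ [] := by
          intro hcon
          have := congrArg List.length hcon
          simp at this; omega
        have ih' := ih hne
        have hlen : (rest.drop 3).length % 4 = (c0 :: rest).length % 4 := by
          simp; omega
        simp only [pvRenderL, List.cons_append, pvRows, List.take_succ_cons,
          List.drop_succ_cons, ht, hd]
        rw [List.map_cons, List.map_cons,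
          pvJoin_newline_cons _ _ (by
            simp only [ne_eq, List.map_eq_nil_iff]
            exact pvRows_ne_nil _ (by simp)),
          pvJoin_newline_cons _ _ (by
            simp only [ne_eq, List.map_eq_nil_iff]
            exact pvRows_ne_nil _ hne)]
        have ih'' : PySem.Chars.join ['\n'] ((pvRows (rest.drop 3 ++ [c])).map pvRowL)
            = PySem.Chars.join ['\n'] ((pvRows (rest.drop 3)).map pvRowL) ++
              (if (rest.drop 3).length % 4 = 0 then "\n    0x".toList ++ c.toList ++ [',']
               else "0x".toList ++ c.toList ++ [',']) := by
          simpa [pvRenderL, List.drop_succ_cons] using ih'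
        rw [ih'', hlen]
        simp

def pvChunkL (str : String) (m : Nat) : List String :=
  PySem.Str.slice str (some (-8)) none ::
    (PySem.List.pyRange 1 (m : Int) 1).map
      (fun i => PySem.Str.slice str (some (-8 - 8 * i)) (some (-8 * i)))

theorem pvMainA (str : String) (m : Nat) :
    ((PySem.List.pyRange 1 (m : Int) 1).foldl
      (fun line i =>
        let j := i * 8
        let temp :=
          if PySem.Int.mod i 4 == 0 then
            "\n    0x" ++ PySem.Str.slice str (some (-8 - j)) (some (-j)) ++ ","
          else
            "0x" ++ PySem.Str.slice str (some (-8 - j)) (some (-j)) ++ ","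
        line ++ temp)
      ("    0x" ++ PySem.Str.slice str (some (-8)) none ++ ",")).toList
    = pvRenderL (pvChunkL str m) := by
  induction m with
  | zero =>
      rw [PySem.List.pyRange_one_eq_nil (by norm_num)]
      simp [pvRenderL, pvChunkL, PySem.List.pyRange_one_eq_nil, pvRows, pvRowL,
        String.toList_append, pvLit1, pvComma, PySem.Chars.join_singleton]
  | succ m ih =>
      by_cases h0 : m = 0
      · subst h0
        rw [show ((0 + 1 : Nat) : Int) = 1 by norm_num,
          PySem.List.pyRange_one_eq_nil (by norm_num)]
        simp [pvRenderL, pvChunkL, PySem.List.pyRange_one_eq_nil, pvRows, pvRowL,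
          String.toList_append, pvLit1, pvComma, PySem.Chars.join_singleton]
      · have h1 : (1 : Int) ≤ (m : Int) := by
          have := Nat.one_le_iff_ne_zero.mpr h0; exact_mod_cast this
        have hcast : ((m + 1 : Nat) : Int) = (m : Int) + 1 := by push_cast; ring
        rw [hcast, PySem.List.pyRange_one_succ_right h1, List.foldl_append,
          List.foldl_cons, List.foldl_nil]
        have hsplit : pvChunkL str (m + 1) = pvChunkL str m ++
            [PySem.Str.slice str (some (-8 - 8 * (m : Int))) (some (-8 * (m : Int)))] := by
          simp [pvChunkL, hcast, PySem.List.pyRange_one_succ_right h1]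
        rw [hsplit, pvRenderL_snoc _ _ (by simp [pvChunkL])]
        have hlen : (pvChunkL str m).length % 4 = m % 4 := by
          simp [pvChunkL, PySem.List.length_pyRange_one]
          omega
        rw [hlen, String.toList_append, ih]
        have e1 : (-8 : Int) - (m : Int) * 8 = -8 - 8 * (m : Int) := by ring
        have e2 : -((m : Int) * 8) = -8 * (m : Int) := by ring
        have hdvd : ((4 : Int) ∣ (m : Int)) ↔ m % 4 = 0 := by omega
        by_cases h4 : m % 4 = 0
        · simp [hdvd, h4, e1, e2, String.toList_append, pvLit2, pvComma]
        · simp [hdvd, h4, e1, e2, String.toList_append, pvComma]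

theorem pvAltToList (str : String) (m : Nat) :
    (PySem.Str.join "\n" ((pvRows (pvChunkL str m)).map (fun row =>
      "    " ++ PySem.Str.join "" (row.map (fun c => "0x" ++ c ++ ","))))).toList
    = pvRenderL (pvChunkL str m) := by
  rw [pvRenderL]
  simp only [PySem.Str.toList_join, List.map_map, pvNewlineL]
  congr 1
  apply List.map_congr_left
  intro row _
  simp [Function.comp, PySem.Str.toList_join, List.map_map, pvRowL]
  congr 1
  apply List.map_congr_left
  intro c _
  simp

-- ===== VERDICT (by name: the statement is the Claim_ definition above) =====
theorem pri_key_convert_spec : Claim_equal_pri_key_convert := by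
  intro s _
  unfold Spec_pri_key_convert
  apply String.toList_inj.mp
  have hfd : PySem.Int.floordiv ((s.toList.length : Nat) : Int) 8
      = ((s.toList.length / 8 : Nat) : Int) := by
    exact_mod_cast PySem.Int.floordiv_natCast s.toList.length 8
  have hA : (pri_key_convert s).toList = pvRenderL (pvChunkL s (s.toList.length / 8)) := by
    simp only [pri_key_convert, PySem.Str.len_eq, hfd]
    exact pvMainA s (s.toList.length / 8)
  have hB : (pri_key_convert_alt s).toList = pvRenderL (pvChunkL s (s.toList.length / 8)) := by
    simp only [pri_key_convert_alt, PySem.Str.len_eq, hfd, List.singleton_append]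
    simpa [pvChunkL] using pvAltToList s (s.toList.length / 8)
  rw [hA, hB]
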